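-- pv_equiv track=rewrite | github.com/phulin/fastlaw | parse_usc_xml.py | parse_identifier
-- ===== SOURCE A (Python) =====
-- def parse_identifier(ident):
--     """Parse /us/usc/t1 or /us/usc/t1/ch1 or /us/usc/t1/s1 -> (title, chapter, section)."""
--     if not ident or not ident.startswith("/us/usc/"):
--         return None, None, None
--     rest = ident[len("/us/usc/") :].strip("/")
--     parts = rest.split("/")
--     title_num = None
--     chapter_num = None
--     section_num = None
--     for part in parts:
--         if part.startswith("t"):
--             title_num = part[1:]
--         elif part.startswith("ch"):
--             chapter_num = part[2:]
--         elif part.startswith("s"):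
--             section_num = part[1:]
--     return title_num, chapter_num, section_num
-- ===== SOURCE B (Python) =====
-- def parse_identifier(ident):
--     """Parse /us/usc/t1 or /us/usc/t1/ch1 or /us/usc/t1/s1 -> (title, chapter, section)."""
--     if not ident or not ident.startswith("/us/usc/"):
--         return None, None, None
--     parts = ident[len("/us/usc/"):].strip("/").split("/")
--     title_num = next((p[1:] for p in reversed(parts) if p.startswith("t")), None)
--     chapter_num = next((p[2:] for p in reversed(parts) if p.startswith("ch")), None)
--     section_num = next((p[1:] for p in reversed(parts) if p.startswith("s")), None)
--     return title_num, chapter_num, section_num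
-- ===== Notes on version B (the rewrite author's own statement) =====
-- stated objective: alternative
-- what changed: Replaces A's single for-loop with if/elif overwrite dispatch by three independent last-match scans (next over reversed(parts)) that compute title, chapter and section separately.
import Mathlib
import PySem

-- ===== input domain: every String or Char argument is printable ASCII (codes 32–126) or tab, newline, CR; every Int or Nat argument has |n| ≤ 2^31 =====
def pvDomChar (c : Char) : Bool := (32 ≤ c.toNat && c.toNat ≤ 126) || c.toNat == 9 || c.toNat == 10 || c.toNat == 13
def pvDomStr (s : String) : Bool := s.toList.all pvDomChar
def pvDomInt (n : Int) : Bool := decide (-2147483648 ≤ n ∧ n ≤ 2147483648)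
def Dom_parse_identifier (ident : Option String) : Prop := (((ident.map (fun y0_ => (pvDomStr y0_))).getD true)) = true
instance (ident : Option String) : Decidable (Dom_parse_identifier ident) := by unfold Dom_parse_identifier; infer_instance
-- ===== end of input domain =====

-- B replaces A's single branch-dispatching loop by three independent last-match
-- scans over the reversed part list (objective: alternative decomposition, same cost).

-- ===== PORT A =====
-- one loop step of A's for-loop: overwrite the matching field, branches in A's order
def pidStep (st : Option String × Option String × Option String) (part : String) :
    Option String × Option String × Option String :=
  if PySem.Str.startswith part "t" then
    (some (PySem.Str.slice part (some 1) none), st.2.1, st.2.2)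
  else if PySem.Str.startswith part "ch" then
    (st.1, some (PySem.Str.slice part (some 2) none), st.2.2)
  else if PySem.Str.startswith part "s" then
    (st.1, st.2.1, some (PySem.Str.slice part (some 1) none))
  else st

def parse_identifier (ident : Option String) : Option String × Option String × Option String :=
  match ident with
  | none => (none, none, none)
  | some s =>
    if s = "" ∨ ¬ PySem.Str.startswith s "/us/usc/" then (none, none, none)
    else
      let rest := PySem.Str.stripChars (PySem.Str.slice s (some 8) none) "/"
      -- "/".split never raises (sep ≠ ""), so split? is always some; getD [] is unreachable
      let parts := (PySem.Str.split? rest "/").getD []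
      parts.foldl pidStep (none, none, none)

-- ===== PORT B =====
def parse_identifier_alt (ident : Option String) : Option String × Option String × Option String :=
  match ident with
  | none => (none, none, none)
  | some s =>
    if s = "" ∨ ¬ PySem.Str.startswith s "/us/usc/" then (none, none, none)
    else
      let rest := PySem.Str.stripChars (PySem.Str.slice s (some 8) none) "/"
      let parts := (PySem.Str.split? rest "/").getD []
      ((parts.reverse.find? (fun p => PySem.Str.startswith p "t")).map
          (fun p => PySem.Str.slice p (some 1) none),
       (parts.reverse.find? (fun p => PySem.Str.startswith p "ch")).map
          (fun p => PySem.Str.slice p (some 2) none),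
       (parts.reverse.find? (fun p => PySem.Str.startswith p "s")).map
          (fun p => PySem.Str.slice p (some 1) none))

-- ===== PRECONDITION & SPEC =====
def Spec_parse_identifier (ident : Option String) (out : Option String × Option String × Option String) : Prop := out = parse_identifier_alt ident
instance (ident : Option String) (out : Option String × Option String × Option String) : Decidable (Spec_parse_identifier ident out) := by unfold Spec_parse_identifier; infer_instance

-- ===== CLAIM (what is proved, stated in full; the proofs are below) =====
def Claim_equal_parse_identifier : Prop := ∀ (ident : Option String), Dom_parse_identifier ident → Spec_parse_identifier ident (parse_identifier ident)

-- ===== LEMMAS AND PROOFS =====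

-- two nonempty patterns with different first characters cannot both be prefixes
theorem sw_disj {cs : List Char} {a b : Char} {ra rb : List Char} (hab : a ≠ b)
    (h : PySem.Chars.startswith cs (a :: ra) = true) :
    PySem.Chars.startswith cs (b :: rb) = false := by
  rw [PySem.Chars.startswith_iff] at h
  obtain ⟨t, ht⟩ := h
  by_contra h'
  rw [Bool.not_eq_false, PySem.Chars.startswith_iff] at h'
  obtain ⟨u, hu⟩ := h'
  rw [← ht] at hu
  simp at hu
  exact hab hu.1.symm

theorem fold_eq (parts : List String) (st : Option String × Option String × Option String) :
    parts.foldl pidStep st =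
      (((parts.reverse.find? (fun p => PySem.Str.startswith p "t")).map
          (fun p => PySem.Str.slice p (some 1) none)).or st.1,
       ((parts.reverse.find? (fun p => PySem.Str.startswith p "ch")).map
          (fun p => PySem.Str.slice p (some 2) none)).or st.2.1,
       ((parts.reverse.find? (fun p => PySem.Str.startswith p "s")).map
          (fun p => PySem.Str.slice p (some 1) none)).or st.2.2) := by
  induction parts generalizing st with
  | nil => simp
  | cons p ps ih =>
    rw [List.foldl_cons, ih]
    by_cases ht : PySem.Chars.startswith p.toList ['t'] = true
    · have hc := sw_disj (cs := p.toList) (by decide) ht (b := 'c') (rb := ['h'])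
      have hs := sw_disj (cs := p.toList) (by decide) ht (b := 's') (rb := [])
      simp [pidStep, List.find?, ht, hc, hs]
    · by_cases hc : PySem.Chars.startswith p.toList ['c', 'h'] = true
      · have hs := sw_disj (cs := p.toList) (by decide) hc (b := 's') (rb := [])
        simp [pidStep, List.find?, ht, hc, hs]
      · by_cases hs : PySem.Chars.startswith p.toList ['s'] = true
        · simp [pidStep, List.find?, ht, hc, hs]
        · simp [pidStep, List.find?, ht, hc, hs]

-- ===== VERDICT (by name: the statement is the Claim_ definition above) =====
theorem parse_identifier_spec : Claim_equal_parse_identifier := by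
  intro ident _
  unfold Spec_parse_identifier parse_identifier parse_identifier_alt
  cases ident with
  | none => rfl
  | some s =>
    dsimp only
    split_ifs
    · rfl
    · rw [fold_eq]
      simp
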